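-- pv_equiv track=rewrite | github.com/Calamivathan/career | analysis/top_skills_by_job_type.py | normalize_job_title
-- ===== SOURCE A (Python) =====
-- def normalize_job_title(title):
--     """Normalize job titles to group similar ones"""
--     if not title:
--         return "Unknown"
--
--     title_lower = title.lower()
--
--     # Define job categories
--     if any(keyword in title_lower for keyword in ['engineer', 'developer', 'programmer']):
--         if 'data' in title_lower:
--             return 'Data Engineer/Developer'
--         elif any(keyword in title_lower for keyword in ['software', 'backend', 'frontend', 'full stack']):
--             return 'Software Engineer/Developer'
--         elif 'ai' in title_lower or 'ml' in title_lower or 'machine learning' in title_lower: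
--             return 'AI/ML Engineer'
--         elif 'qa' in title_lower or 'test' in title_lower:
--             return 'QA/Test Engineer'
--         else:
--             return 'Engineer/Developer'
--     elif 'analyst' in title_lower:
--         if 'data' in title_lower:
--             return 'Data Analyst'
--         elif 'business' in title_lower:
--             return 'Business Analyst'
--         else:
--             return 'Analyst'
--     elif any(keyword in title_lower for keyword in ['manager', 'lead', 'head']):
--         return 'Management/Leadership'
--     elif 'scientist' in title_lower:
--         return 'Data Scientist'
--     elif any(keyword in title_lower for keyword in ['intern', 'trainee']):
--         return 'Internship/Trainee'
--     elif any(keyword in title_lower for keyword in ['consultant', 'advisor']):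
--         return 'Consultant/Advisor'
--     elif any(keyword in title_lower for keyword in ['designer', 'ui', 'ux']):
--         return 'Design/UX'
--     elif any(keyword in title_lower for keyword in ['marketing', 'sales']):
--         return 'Marketing/Sales'
--     else:
--         return 'Other'
-- ===== SOURCE B (Python) =====
-- # B: table-driven classifier — an ordered rule list of (keyword-groups, label) pairs,
-- # scanned once for the first rule all of whose groups match; same priority as A's nested ifs.
-- _RULES = [
--     ((('engineer', 'developer', 'programmer'), ('data',)), 'Data Engineer/Developer'),
--     ((('engineer', 'developer', 'programmer'),
--       ('software', 'backend', 'frontend', 'full stack')), 'Software Engineer/Developer'),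
--     ((('engineer', 'developer', 'programmer'),
--       ('ai', 'ml', 'machine learning')), 'AI/ML Engineer'),
--     ((('engineer', 'developer', 'programmer'), ('qa', 'test')), 'QA/Test Engineer'),
--     ((('engineer', 'developer', 'programmer'),), 'Engineer/Developer'),
--     ((('analyst',), ('data',)), 'Data Analyst'),
--     ((('analyst',), ('business',)), 'Business Analyst'),
--     ((('analyst',),), 'Analyst'),
--     ((('manager', 'lead', 'head'),), 'Management/Leadership'),
--     ((('scientist',),), 'Data Scientist'),
--     ((('intern', 'trainee'),), 'Internship/Trainee'),
--     ((('consultant', 'advisor'),), 'Consultant/Advisor'),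
--     ((('designer', 'ui', 'ux'),), 'Design/UX'),
--     ((('marketing', 'sales'),), 'Marketing/Sales'),
-- ]
--
--
-- def normalize_job_title(title):
--     if not title:
--         return "Unknown"
--     title_lower = title.lower()
--     for groups, label in _RULES:
--         if all(any(k in title_lower for k in g) for g in groups):
--             return label
--     return 'Other'
-- ===== Notes on version B (the rewrite author's own statement) =====
-- stated objective: alternative
-- what changed: Replaced A's nested if/elif cascade with a single ordered rule table of (keyword-groups, label) pairs scanned once for the first rule whose groups all match.
import Mathlib
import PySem

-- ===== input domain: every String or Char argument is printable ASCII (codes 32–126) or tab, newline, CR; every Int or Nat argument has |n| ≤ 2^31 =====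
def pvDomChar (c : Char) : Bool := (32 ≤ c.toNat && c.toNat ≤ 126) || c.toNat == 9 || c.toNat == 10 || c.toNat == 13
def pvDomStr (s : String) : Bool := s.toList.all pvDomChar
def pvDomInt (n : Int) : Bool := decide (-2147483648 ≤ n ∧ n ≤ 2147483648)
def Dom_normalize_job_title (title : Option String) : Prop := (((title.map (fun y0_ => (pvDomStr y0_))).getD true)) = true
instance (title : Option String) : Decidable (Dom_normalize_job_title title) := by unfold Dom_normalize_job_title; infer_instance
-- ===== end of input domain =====

-- B replaces A's nested if/elif cascade with an ordered rule table scanned for the first match (same cost, different decomposition).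

-- ===== PORT A =====
def normalize_job_title (title : Option String) : String :=
  match title with
  | none => "Unknown"
  | some t =>
    if t = "" then "Unknown"
    else
      let tl := PySem.Str.lower t
      if ["engineer", "developer", "programmer"].any (fun k => PySem.Str.isIn k tl) then
        if PySem.Str.isIn "data" tl then "Data Engineer/Developer"
        else if ["software", "backend", "frontend", "full stack"].any (fun k => PySem.Str.isIn k tl) then "Software Engineer/Developer"
        else if PySem.Str.isIn "ai" tl || PySem.Str.isIn "ml" tl || PySem.Str.isIn "machine learning" tl then "AI/ML Engineer"
        else if PySem.Str.isIn "qa" tl || PySem.Str.isIn "test" tl then "QA/Test Engineer"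
        else "Engineer/Developer"
      else if PySem.Str.isIn "analyst" tl then
        if PySem.Str.isIn "data" tl then "Data Analyst"
        else if PySem.Str.isIn "business" tl then "Business Analyst"
        else "Analyst"
      else if ["manager", "lead", "head"].any (fun k => PySem.Str.isIn k tl) then "Management/Leadership"
      else if PySem.Str.isIn "scientist" tl then "Data Scientist"
      else if ["intern", "trainee"].any (fun k => PySem.Str.isIn k tl) then "Internship/Trainee"
      else if ["consultant", "advisor"].any (fun k => PySem.Str.isIn k tl) then "Consultant/Advisor"
      else if ["designer", "ui", "ux"].any (fun k => PySem.Str.isIn k tl) then "Design/UX"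
      else if ["marketing", "sales"].any (fun k => PySem.Str.isIn k tl) then "Marketing/Sales"
      else "Other"

-- ===== PORT B =====
-- the ordered rule table of Source B (_RULES)
def pvRules : List (List (List String) × String) :=
  [ ([["engineer", "developer", "programmer"], ["data"]], "Data Engineer/Developer"),
    ([["engineer", "developer", "programmer"], ["software", "backend", "frontend", "full stack"]], "Software Engineer/Developer"),
    ([["engineer", "developer", "programmer"], ["ai", "ml", "machine learning"]], "AI/ML Engineer"),
    ([["engineer", "developer", "programmer"], ["qa", "test"]], "QA/Test Engineer"),
    ([["engineer", "developer", "programmer"]], "Engineer/Developer"),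
    ([["analyst"], ["data"]], "Data Analyst"),
    ([["analyst"], ["business"]], "Business Analyst"),
    ([["analyst"]], "Analyst"),
    ([["manager", "lead", "head"]], "Management/Leadership"),
    ([["scientist"]], "Data Scientist"),
    ([["intern", "trainee"]], "Internship/Trainee"),
    ([["consultant", "advisor"]], "Consultant/Advisor"),
    ([["designer", "ui", "ux"]], "Design/UX"),
    ([["marketing", "sales"]], "Marketing/Sales") ]

-- the for-loop of Source B: return the label of the first rule whose groups all match
def pvFirstMatch (tl : String) : List (List (List String) × String) → String
  | [] => "Other"
  | (groups, label) :: rest =>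
    if groups.all (fun g => g.any (fun k => PySem.Str.isIn k tl)) then label
    else pvFirstMatch tl rest

def normalize_job_title_alt (title : Option String) : String :=
  match title with
  | none => "Unknown"
  | some t =>
    if t = "" then "Unknown"
    else pvFirstMatch (PySem.Str.lower t) pvRules

-- ===== PRECONDITION & SPEC =====
def Spec_normalize_job_title (title : Option String) (out : String) : Prop := out = normalize_job_title_alt title
instance (title : Option String) (out : String) : Decidable (Spec_normalize_job_title title out) := by unfold Spec_normalize_job_title; infer_instance

-- ===== CLAIM (what is proved, stated in full; the proofs are below) =====
def Claim_equal_normalize_job_title : Prop := ∀ (title : Option String), Dom_normalize_job_title title → Spec_normalize_job_title title (normalize_job_title title)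

-- ===== LEMMAS AND PROOFS =====
set_option maxHeartbeats 4000000 in
theorem pvTable_eq_cascade (tl : String) :
    pvFirstMatch tl pvRules =
      (if ["engineer", "developer", "programmer"].any (fun k => PySem.Str.isIn k tl) then
        if PySem.Str.isIn "data" tl then "Data Engineer/Developer"
        else if ["software", "backend", "frontend", "full stack"].any (fun k => PySem.Str.isIn k tl) then "Software Engineer/Developer"
        else if PySem.Str.isIn "ai" tl || PySem.Str.isIn "ml" tl || PySem.Str.isIn "machine learning" tl then "AI/ML Engineer"
        else if PySem.Str.isIn "qa" tl || PySem.Str.isIn "test" tl then "QA/Test Engineer"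
        else "Engineer/Developer"
      else if PySem.Str.isIn "analyst" tl then
        if PySem.Str.isIn "data" tl then "Data Analyst"
        else if PySem.Str.isIn "business" tl then "Business Analyst"
        else "Analyst"
      else if ["manager", "lead", "head"].any (fun k => PySem.Str.isIn k tl) then "Management/Leadership"
      else if PySem.Str.isIn "scientist" tl then "Data Scientist"
      else if ["intern", "trainee"].any (fun k => PySem.Str.isIn k tl) then "Internship/Trainee"
      else if ["consultant", "advisor"].any (fun k => PySem.Str.isIn k tl) then "Consultant/Advisor"
      else if ["designer", "ui", "ux"].any (fun k => PySem.Str.isIn k tl) then "Design/UX"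
      else if ["marketing", "sales"].any (fun k => PySem.Str.isIn k tl) then "Marketing/Sales"
      else "Other") := by
  simp only [pvRules, pvFirstMatch, List.all_cons, List.all_nil, List.any_cons, List.any_nil,
    Bool.and_true, Bool.or_false, Bool.or_assoc]
  generalize PySem.Str.isIn "engineer" tl = b0
  generalize PySem.Str.isIn "developer" tl = b1
  generalize PySem.Str.isIn "programmer" tl = b2
  generalize PySem.Str.isIn "data" tl = b3
  generalize PySem.Str.isIn "software" tl = b4
  generalize PySem.Str.isIn "backend" tl = b5
  generalize PySem.Str.isIn "frontend" tl = b6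
  generalize PySem.Str.isIn "full stack" tl = b7
  generalize PySem.Str.isIn "ai" tl = b8
  generalize PySem.Str.isIn "ml" tl = b9
  generalize PySem.Str.isIn "machine learning" tl = b10
  generalize PySem.Str.isIn "qa" tl = b11
  generalize PySem.Str.isIn "test" tl = b12
  generalize PySem.Str.isIn "analyst" tl = b13
  generalize PySem.Str.isIn "business" tl = b14
  generalize PySem.Str.isIn "manager" tl = b15
  generalize PySem.Str.isIn "lead" tl = b16
  generalize PySem.Str.isIn "head" tl = b17
  generalize PySem.Str.isIn "scientist" tl = b18
  generalize PySem.Str.isIn "intern" tl = b19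
  generalize PySem.Str.isIn "trainee" tl = b20
  generalize PySem.Str.isIn "consultant" tl = b21
  generalize PySem.Str.isIn "advisor" tl = b22
  generalize PySem.Str.isIn "designer" tl = b23
  generalize PySem.Str.isIn "ui" tl = b24
  generalize PySem.Str.isIn "ux" tl = b25
  generalize PySem.Str.isIn "marketing" tl = b26
  generalize PySem.Str.isIn "sales" tl = b27
  generalize (b0 || (b1 || b2)) = c0
  generalize (b4 || (b5 || (b6 || b7))) = c2
  generalize (b8 || (b9 || b10)) = c3
  generalize (b11 || b12) = c4
  generalize (b15 || (b16 || b17)) = c5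
  generalize (b19 || b20) = c6
  generalize (b21 || b22) = c7
  generalize (b23 || (b24 || b25)) = c8
  generalize (b26 || b27) = c9
  revert c0 c2 c3 c4 c5 c6 c7 c8 c9 b3 b13 b14 b18
  decide

-- ===== VERDICT (by name: the statement is the Claim_ definition above) =====
theorem normalize_job_title_spec : Claim_equal_normalize_job_title := by
  intro title _
  unfold Spec_normalize_job_title normalize_job_title normalize_job_title_alt
  match title with
  | none => rfl
  | some t =>
    by_cases h : t = ""
    · simp [h]
    · simp only [h, if_false, pvTable_eq_cascade]
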